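-- pv_equiv track=rewrite | github.com/christianwgd/advent_of_code_2020 | day14/solution.py | bin_decode
-- ===== SOURCE A (Python) =====
-- import itertools
--
-- def bin_decode(str):
--     result_list = []
--     count = str.count('X')
--     repl = list(itertools.product(['0', '1'], repeat=count))
--     for r in repl:
--         res = str
--         for b in r:
--             res = res.replace('X', b, 1)
--         result_list.append(res)
--     return result_list
-- ===== SOURCE B (Python) =====
-- def bin_decode(str):
--     tails = ['']
--     for head in reversed(str):
--         if head == 'X':
--             tails = ['0' + t for t in tails] + ['1' + t for t in tails]
--         else:
--             tails = [head + t for t in tails]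
--     return tails
-- ===== Notes on version B (the rewrite author's own statement) =====
-- stated objective: alternative
-- what changed: Replaces the itertools.product table plus, per tuple, repeated single-occurrence str.replace scans, by one right-to-left pass over the string that maintains the list of decoded suffixes, branching zero-digit before one-digit at each wildcard so the enumeration order is identical.
import Mathlib
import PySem

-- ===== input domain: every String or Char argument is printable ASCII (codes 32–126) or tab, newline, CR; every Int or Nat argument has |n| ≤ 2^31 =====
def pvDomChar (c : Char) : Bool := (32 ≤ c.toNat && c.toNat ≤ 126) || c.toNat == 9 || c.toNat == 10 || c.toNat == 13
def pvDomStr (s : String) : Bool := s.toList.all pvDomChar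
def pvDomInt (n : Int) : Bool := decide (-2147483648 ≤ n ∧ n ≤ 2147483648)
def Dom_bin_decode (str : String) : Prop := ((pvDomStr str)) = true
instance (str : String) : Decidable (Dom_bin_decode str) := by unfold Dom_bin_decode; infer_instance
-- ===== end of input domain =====

-- B replaces the itertools.product table + repeated single-replace passes by one
-- right-to-left pass maintaining the list of decoded suffixes, branching '0' then '1'
-- at each 'X' (objective: alternative; same enumeration order).

-- ===== PORT A =====
-- itertools.product(['0','1'], repeat=n), in product's order (first position varies slowest)
def pvProdRep : Nat → List (List Char)
  | 0 => [[]]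
  | n + 1 => (['0', '1'] : List Char).flatMap (fun x => (pvProdRep n).map (fun r => x :: r))

-- hand port of res.replace('X', b, 1): exact here because the pattern is the single
-- character 'X' and the count is 1, so it replaces the first 'X' if any
def pvReplFirst : List Char → Char → List Char
  | [], _ => []
  | c :: l, b => if c = 'X' then b :: l else c :: pvReplFirst l b

def bin_decode (str : String) : List String :=
  let count := PySem.Str.count str "X"
  let repl := pvProdRep count
  repl.foldl (fun result_list r =>
    result_list ++ [String.mk (r.foldl pvReplFirst str.toList)]) []

-- ===== PORT B =====
def bin_decode_alt (str : String) : List String :=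
  (str.toList.reverse.foldl (fun tails head =>
    if head = 'X' then tails.map ('0' :: ·) ++ tails.map ('1' :: ·)
    else tails.map (head :: ·)) [[]]).map String.mk

-- ===== PRECONDITION & SPEC =====
def Spec_bin_decode (str : String) (out : List String) : Prop := out = bin_decode_alt str
instance (str : String) (out : List String) : Decidable (Spec_bin_decode str out) := by unfold Spec_bin_decode; infer_instance

-- ===== CLAIM (what is proved, stated in full; the proofs are below) =====
def Claim_equal_bin_decode : Prop := ∀ (str : String), Dom_bin_decode str → Spec_bin_decode str (bin_decode str)

-- ===== LEMMAS AND PROOFS =====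

-- proof-side view of B's loop: the same step, as a structural recursion
def pvGo : List Char → List (List Char)
  | [] => [[]]
  | head :: rest =>
    let tails := pvGo rest
    if head = 'X' then tails.map ('0' :: ·) ++ tails.map ('1' :: ·)
    else tails.map (head :: ·)

theorem pvFoldl_reverse_eq_pvGo (s : List Char) :
    s.reverse.foldl (fun tails head =>
      if head = 'X' then tails.map ('0' :: ·) ++ tails.map ('1' :: ·)
      else tails.map (head :: ·)) [[]] = pvGo s := by
  rw [List.foldl_reverse]
  induction s with
  | nil => rfl
  | cons c rest ih => simp [pvGo, ih]

theorem pvCount_go_single (b : Char) :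
    ∀ (fuel : Nat) (l : List Char) (acc : Nat), l.length ≤ fuel →
      PySem.Chars.count.go [b] fuel l acc = acc + l.count b := by
  intro fuel
  induction fuel with
  | zero =>
    intro l acc h
    have : l = [] := List.length_eq_zero_iff.mp (Nat.le_zero.mp h)
    subst this; simp [PySem.Chars.count.go]
  | succ n ih =>
    intro l acc h
    cases l with
    | nil => simp [PySem.Chars.count.go]
    | cons c t =>
      by_cases hc : c = b
      · subst hc
        have hp : List.isPrefixOf [c] (c :: t) = true := by simp [List.isPrefixOf]
        simp only [PySem.Chars.count.go, hp, if_pos, List.length_cons, List.length_nil,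
          List.drop_succ_cons, List.drop_zero]
        rw [ih t (acc + 1) (Nat.le_of_succ_le_succ h)]
        simp
        omega
      · have hp : List.isPrefixOf [b] (c :: t) = false := by
          simp [List.isPrefixOf]
          intro hbc
          exact absurd hbc.symm hc
        simp only [PySem.Chars.count.go, hp, Bool.false_eq_true, if_false]
        rw [ih t acc (Nat.le_of_succ_le_succ h)]
        rw [List.count_cons_of_ne hc]

theorem pvCount_single (l : List Char) (b : Char) :
    PySem.Chars.count l [b] = l.count b := by
  have h : PySem.Chars.count l [b] = PySem.Chars.count.go [b] l.length l 0 := by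
    simp [PySem.Chars.count]
  rw [h]
  simpa using pvCount_go_single b l.length l 0 le_rfl

theorem pvReplFirst_cons_ne (c : Char) (hc : c ≠ 'X') :
    ∀ (r : List Char) (l : List Char),
      r.foldl pvReplFirst (c :: l) = c :: r.foldl pvReplFirst l := by
  intro r
  induction r with
  | nil => intro l; rfl
  | cons b t ih =>
    intro l
    simp only [List.foldl_cons]
    rw [show pvReplFirst (c :: l) b = c :: pvReplFirst l b by rw [show pvReplFirst (c :: l) b = if c = 'X' then b :: l else c :: pvReplFirst l b from rfl, if_neg hc]]
    exact ih _

theorem pvKey : ∀ (s : List Char),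
    (pvProdRep (s.count 'X')).map (fun r => r.foldl pvReplFirst s) = pvGo s := by
  intro s
  induction s with
  | nil => simp [pvProdRep, pvGo]
  | cons c rest ih =>
    by_cases hc : c = 'X'
    · subst hc
      have hcount : ('X' :: rest).count 'X' = rest.count 'X' + 1 := by
        simp
      rw [hcount]
      have hgo : pvGo ('X' :: rest) =
          (pvGo rest).map ('0' :: ·) ++ (pvGo rest).map ('1' :: ·) := by
        simp [pvGo]
      rw [hgo, show pvProdRep (rest.count 'X' + 1) =
          (pvProdRep (rest.count 'X')).map ('0' :: ·) ++
          (pvProdRep (rest.count 'X')).map ('1' :: ·) by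
        simp [pvProdRep]]
      rw [List.map_append, List.map_map, List.map_map]
      congr 1
      · rw [← ih, List.map_map]
        refine List.map_congr_left fun r _ => ?_
        simp only [Function.comp_apply, List.foldl_cons]
        rw [show pvReplFirst ('X' :: rest) '0' = '0' :: rest by simp [pvReplFirst]]
        rw [pvReplFirst_cons_ne '0' (by decide)]
      · rw [← ih, List.map_map]
        refine List.map_congr_left fun r _ => ?_
        simp only [Function.comp_apply, List.foldl_cons]
        rw [show pvReplFirst ('X' :: rest) '1' = '1' :: rest by simp [pvReplFirst]]
        rw [pvReplFirst_cons_ne '1' (by decide)]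
    · have hcount : (c :: rest).count 'X' = rest.count 'X' := by
        simp [hc]
      rw [hcount]
      have hgo : pvGo (c :: rest) = (pvGo rest).map (c :: ·) := by
        simp [pvGo, hc]
      rw [hgo, ← ih, List.map_map]
      refine List.map_congr_left fun r _ => ?_
      simp only [Function.comp_apply]
      exact pvReplFirst_cons_ne c hc r rest

-- ===== VERDICT (by name: the statement is the Claim_ definition above) =====
theorem bin_decode_spec : Claim_equal_bin_decode := by
  intro str _
  unfold Spec_bin_decode bin_decode bin_decode_alt
  rw [PySem.List.foldl_append_singleton_eq_map]
  rw [show PySem.Str.count str "X" = str.toList.count 'X' by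
    rw [PySem.Str.count_eq]; exact pvCount_single _ _]
  rw [pvFoldl_reverse_eq_pvGo, ← pvKey str.toList, List.map_map]
  rfl
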